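-- pv_equiv track=rewrite | github.com/VuHai-Sec/APK_obfuscator | SmaliUtils.py | replace_param_v_registers_with_p_aliases
-- ===== SOURCE A (Python) =====
-- from typing import Iterator, List, Optional, Sequence, Tuple
--
-- def replace_param_v_registers_with_p_aliases(
--     line: str, first_param_register: int, parameter_register_count: int
-- ) -> str:
--     if parameter_register_count <= 0:
--         return line
--
--     result: List[str] = []
--     index = 0
--     in_string = False
--
--     while index < len(line):
--         char = line[index]
--
--         if in_string:
--             result.append(char)
--             if char == "\\" and index + 1 < len(line):
--                 result.append(line[index + 1])
--                 index += 2
--                 continue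
--             if char == '"':
--                 in_string = False
--             index += 1
--             continue
--
--         if char == '"':
--             in_string = True
--             result.append(char)
--             index += 1
--             continue
--
--         if char == "v":
--             prev_char = line[index - 1] if index > 0 else ""
--             digit_index = index + 1
--             while digit_index < len(line) and line[digit_index].isdigit():
--                 digit_index += 1
--
--             if digit_index > index + 1:
--                 next_char = line[digit_index] if digit_index < len(line) else ""
--                 if not (prev_char.isalnum() or prev_char in {"_", "$"}) and not (
--                     next_char.isalnum() or next_char in {"_", "$"}
--                 ):
--                     register_number = int(line[index + 1 : digit_index])
--                     if first_param_register <= register_number < first_param_register + parameter_register_count: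
--                         result.append(f"p{register_number - first_param_register}")
--                         index = digit_index
--                         continue
--
--         result.append(char)
--         index += 1
--
--     return "".join(result)
-- ===== SOURCE B (Python) =====
-- def replace_param_v_registers_with_p_aliases(line, first_param_register, parameter_register_count):
--     if parameter_register_count <= 0:
--         return line
--
--     def is_word(c):
--         return c.isalnum() or c in "_$"
--
--     def map_token(tok):
--         if tok[:1] == "v" and tok[1:].isdigit():
--             n = int(tok[1:])
--             if first_param_register <= n < first_param_register + parameter_register_count:
--                 return "p" + str(n - first_param_register)
--         return tok
--
--     def split_segments(s):
--         # alternate (True, code) / (False, string-literal incl. quotes) segments;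
--         # escaped pairs inside a string literal are consumed atomically
--         rest = s
--         while rest:
--             head, sep, tail = rest.partition('"')
--             if head:
--                 yield True, head
--             if not sep:
--                 return
--             body = ['"']
--             while tail:
--                 c, tail = tail[0], tail[1:]
--                 if c == "\\" and tail:
--                     body.append(c + tail[0])
--                     tail = tail[1:]
--                     continue
--                 body.append(c)
--                 if c == '"':
--                     break
--             yield False, "".join(body)
--             rest = tail
--
--     def replace_in_code(seg):
--         out = []
--         while seg:
--             if is_word(seg[0]):
--                 j = 1
--                 while j < len(seg) and is_word(seg[j]):
--                     j += 1
--                 out.append(map_token(seg[:j]))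
--                 seg = seg[j:]
--             else:
--                 out.append(seg[0])
--                 seg = seg[1:]
--         return "".join(out)
--
--     return "".join(seg if not is_code else replace_in_code(seg)
--                    for is_code, seg in split_segments(line))
-- ===== Notes on version B (the rewrite author's own statement) =====
-- stated objective: alternative
-- what changed: A's single char-by-char state machine (in_string flag, manual index jumps, lookbehind prev_char and lookahead digit scan) is replaced by a two-level functional decomposition: the line is first split into alternating code / string-literal segments, then each code segment is tokenised into maximal word-character runs and every run of the form v<digits> in the parameter window is mapped to its p-alias; no lookbehind/lookahead or in_string state is needed.
import Mathlib
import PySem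

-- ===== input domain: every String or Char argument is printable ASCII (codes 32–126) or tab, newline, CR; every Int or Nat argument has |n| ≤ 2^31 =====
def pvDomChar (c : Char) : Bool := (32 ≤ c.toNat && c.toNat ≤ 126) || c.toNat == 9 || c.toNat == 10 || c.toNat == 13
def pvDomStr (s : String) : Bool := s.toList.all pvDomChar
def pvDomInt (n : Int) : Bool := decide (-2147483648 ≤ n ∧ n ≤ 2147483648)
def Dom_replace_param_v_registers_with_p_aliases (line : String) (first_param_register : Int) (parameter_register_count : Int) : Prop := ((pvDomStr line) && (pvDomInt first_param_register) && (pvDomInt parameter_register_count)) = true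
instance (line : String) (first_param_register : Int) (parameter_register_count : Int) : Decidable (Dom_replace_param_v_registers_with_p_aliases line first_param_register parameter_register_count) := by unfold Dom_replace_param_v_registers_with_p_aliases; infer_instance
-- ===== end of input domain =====

-- B re-implements the scan as string-literal segmentation + word-run tokenisation
-- (alternative decomposition, same cost); A's char-by-char state machine with
-- lookbehind/lookahead is reproduced exactly on the stated domain.

-- ===== PORT A =====
-- word character in A's boundary test: isalnum() or one of {_, $} (ASCII domain)
def pvWord (c : Char) : Bool := PySem.Chars.isalnum c || c == '_' || c == '$'
-- int() applied to a nonempty all-digit string (how both programs use it)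
def pvDigitsVal (ds : List Char) : Int := ds.foldl (fun a c => 10 * a + ((c.toNat : Int) - 48)) 0
-- prev_char blocking test: prev_char.isalnum() or prev_char in {_, $} ("" at line start)
def pvPrevBlk : Option Char → Bool
  | none => false
  | some p => pvWord p
-- next_char blocking test ("" at end of line)
def pvNextBlk : List Char → Bool
  | [] => false
  | d :: _ => pvWord d

-- A's while loop; the remaining suffix replaces the index, prev carries line[index-1]
def pvALoop (fpr cnt : Int) : List Char → Bool → Option Char → List Char
  | [], _, _ => []
  | c :: rest, true, _ =>
    if c == '\\' then
      match rest with
      | c2 :: rest2 => c :: c2 :: pvALoop fpr cnt rest2 true (some c2)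
      | [] => c :: pvALoop fpr cnt [] true (some c)
    else if c == '"' then c :: pvALoop fpr cnt rest false (some c)
    else c :: pvALoop fpr cnt rest true (some c)
  | c :: rest, false, prev =>
    if c == '"' then c :: pvALoop fpr cnt rest true (some c)
    else if c == 'v' then
      let ds := rest.takeWhile PySem.Chars.isdigit
      if 0 < ds.length then
        let rest' := rest.dropWhile PySem.Chars.isdigit
        if pvPrevBlk prev == false && pvNextBlk rest' == false then
          let n := pvDigitsVal ds
          if fpr ≤ n ∧ n < fpr + cnt then
            'p' :: PySem.Int.toChars (n - fpr) ++ pvALoop fpr cnt rest' false ds.getLast?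
          else c :: pvALoop fpr cnt rest false (some c)
        else c :: pvALoop fpr cnt rest false (some c)
      else c :: pvALoop fpr cnt rest false (some c)
    else c :: pvALoop fpr cnt rest false (some c)
termination_by cs _ _ => cs.length
decreasing_by
  all_goals simp only [List.length_cons]
  all_goals first
    | omega
    | (have h := List.length_dropWhile_le (p := PySem.Chars.isdigit) (l := rest); omega)

def replace_param_v_registers_with_p_aliases (line : String) (first_param_register : Int) (parameter_register_count : Int) : String :=
  if parameter_register_count ≤ 0 then line
  else String.mk (pvALoop first_param_register parameter_register_count line.toList false none)

-- ===== PORT B =====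
-- map_token: "v" + digits in the parameter window becomes its p-alias
def pvMapToken (fpr cnt : Int) (tok : List Char) : List Char :=
  match tok with
  | 'v' :: ds =>
    if ds ≠ [] ∧ ds.all PySem.Chars.isdigit then
      if fpr ≤ pvDigitsVal ds ∧ pvDigitsVal ds < fpr + cnt then
        'p' :: PySem.Int.toChars (pvDigitsVal ds - fpr)
      else tok
    else tok
  | _ => tok

-- inner while of split_segments: string-literal body up to and incl. the closing quote
def pvTakeString : List Char → List Char × List Char
  | [] => ([], [])
  | '\\' :: c2 :: rest => ('\\' :: c2 :: (pvTakeString rest).1, (pvTakeString rest).2)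
  | '"' :: rest => (['"'], rest)
  | c :: rest => (c :: (pvTakeString rest).1, (pvTakeString rest).2)

theorem pvTakeString_snd_le (cs : List Char) : (pvTakeString cs).2.length ≤ cs.length := by
  fun_induction pvTakeString cs <;> simp_all <;> omega

-- split_segments: alternate (true, code) / (false, string literal) pieces
def pvSegs : List Char → List (Bool × List Char)
  | cs =>
    let head := cs.takeWhile (fun c => c ≠ '"')
    match h : cs.dropWhile (fun c => c ≠ '"') with
    | [] => if head.isEmpty then [] else [(true, head)]
    | _q :: tail =>
      (if head.isEmpty then [] else [(true, head)]) ++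
        (false, '"' :: (pvTakeString tail).1) :: pvSegs (pvTakeString tail).2
termination_by cs => cs.length
decreasing_by
  have h1 := pvTakeString_snd_le tail
  have h2 := List.length_dropWhile_le (p := fun c => c ≠ '"') (l := cs)
  rw [h] at h2
  simp only [List.length_cons] at h2
  show (pvTakeString tail).2.length < cs.length
  omega

-- replace_in_code: maximal word-char runs through map_token, other chars copied
def pvReplaceInCode (fpr cnt : Int) : List Char → List Char
  | [] => []
  | c :: rest =>
    if pvWord c then
      pvMapToken fpr cnt ((c :: rest).takeWhile pvWord) ++
        pvReplaceInCode fpr cnt ((c :: rest).dropWhile pvWord)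
    else c :: pvReplaceInCode fpr cnt rest
termination_by cs => cs.length
decreasing_by
  simp only [List.dropWhile_cons, *, if_true]
  have h := List.length_dropWhile_le (p := pvWord) (l := rest)
  simp only [List.length_cons]
  omega
  · simp

def replace_param_v_registers_with_p_aliases_alt (line : String) (first_param_register : Int) (parameter_register_count : Int) : String :=
  if parameter_register_count ≤ 0 then line
  else String.mk
    (((pvSegs line.toList).map
      (fun s => if s.1 then pvReplaceInCode first_param_register parameter_register_count s.2 else s.2)).flatten)

-- ===== PRECONDITION & SPEC =====
def Spec_replace_param_v_registers_with_p_aliases (line : String) (first_param_register : Int) (parameter_register_count : Int) (out : String) : Prop := out = replace_param_v_registers_with_p_aliases_alt line first_param_register parameter_register_count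
instance (line : String) (first_param_register : Int) (parameter_register_count : Int) (out : String) : Decidable (Spec_replace_param_v_registers_with_p_aliases line first_param_register parameter_register_count out) := by unfold Spec_replace_param_v_registers_with_p_aliases; infer_instance

-- ===== CLAIM (what is proved, stated in full; the proofs are below) =====
def Claim_equal_replace_param_v_registers_with_p_aliases : Prop := ∀ (line : String) (first_param_register : Int) (parameter_register_count : Int), Dom_replace_param_v_registers_with_p_aliases line first_param_register parameter_register_count → Spec_replace_param_v_registers_with_p_aliases line first_param_register parameter_register_count (replace_param_v_registers_with_p_aliases line first_param_register parameter_register_count)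

-- ===== LEMMAS AND PROOFS =====

-- B's piece-joining, as a function of the char list
def pvJoinF (fpr cnt : Int) (cs : List Char) : List Char :=
  ((pvSegs cs).map (fun s => if s.1 then pvReplaceInCode fpr cnt s.2 else s.2)).flatten

-- ---- generic takeWhile/dropWhile facts ----
theorem pvTW_sub {p q : Char → Bool} (hpq : ∀ x, p x = true → q x = true) :
    ∀ l : List Char, l.takeWhile p = (l.takeWhile q).takeWhile p := by
  intro l
  induction l with
  | nil => rfl
  | cons x xs ih =>
    by_cases hx : p x = true
    · simp [List.takeWhile_cons, hx, hpq x hx, ih]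
    · simp only [Bool.not_eq_true] at hx
      by_cases hq : q x = true <;> simp [List.takeWhile_cons, hx, hq]

theorem pvTW_split {p q : Char → Bool} (hpq : ∀ x, p x = true → q x = true) :
    ∀ l : List Char, l.takeWhile q = l.takeWhile p ++ (l.dropWhile p).takeWhile q := by
  intro l
  induction l with
  | nil => rfl
  | cons x xs ih =>
    by_cases hx : p x = true
    · simp [List.takeWhile_cons, List.dropWhile_cons, hx, hpq x hx, ih]
    · simp only [Bool.not_eq_true] at hx
      simp [List.takeWhile_cons, List.dropWhile_cons, hx]

theorem pvDW_sub {p q : Char → Bool} (hpq : ∀ x, p x = true → q x = true) :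
    ∀ l : List Char, l.dropWhile q = (l.dropWhile p).dropWhile q := by
  intro l
  induction l with
  | nil => rfl
  | cons x xs ih =>
    by_cases hx : p x = true
    · simp [List.dropWhile_cons, hx, hpq x hx, ih]
    · simp only [Bool.not_eq_true] at hx
      simp [List.dropWhile_cons, hx]

theorem pvHead_dropWhile {p : Char → Bool} {l : List Char} {c : Char}
    (h : (l.dropWhile p).head? = some c) : p c = false := by
  induction l with
  | nil => simp at h
  | cons x xs ih =>
    by_cases hx : p x = true
    · simp [List.dropWhile_cons, hx] at h; exact ih (by simpa using h)
    · simp only [Bool.not_eq_true] at hx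
      simp [List.dropWhile_cons, hx] at h
      subst h
      exact hx

theorem pvHead_takeWhile {p : Char → Bool} {l : List Char} {c : Char}
    (h : (l.takeWhile p).head? = some c) : l.head? = some c := by
  cases l with
  | nil => simp at h
  | cons x xs =>
    by_cases hx : p x = true <;> simp [List.takeWhile_cons, hx] at h <;> simp [h]

theorem pvDW_append {p : Char → Bool} (u t : List Char)
    (ht : ∀ d, t.head? = some d → p d = false) :
    (u ++ t).dropWhile p = u.dropWhile p ++ t := by
  induction u with
  | nil =>
    cases t with
    | nil => rfl
    | cons d t' => simp [List.dropWhile_cons, ht d rfl]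
  | cons x xs ih =>
    by_cases hx : p x = true
    · simp [List.dropWhile_cons, hx, ih]
    · simp only [Bool.not_eq_true] at hx
      simp [List.dropWhile_cons, hx]

theorem pvTW_append {p : Char → Bool} (u t : List Char)
    (hu : ∀ x ∈ u, p x = true) (ht : ∀ d, t.head? = some d → p d = false) :
    (u ++ t).takeWhile p = u := by
  induction u with
  | nil =>
    cases t with
    | nil => rfl
    | cons d t' => simp [List.takeWhile_cons, ht d rfl]
  | cons x xs ih =>
    simp [List.takeWhile_cons, hu x (by simp)]
    exact ih (fun y hy => hu y (by simp [hy]))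

theorem pvDropWhile_nil_all {p : Char → Bool} {l : List Char}
    (h : l.dropWhile p = []) : ∀ x ∈ l, p x = true := by
  induction l with
  | nil => simp
  | cons y ys ih =>
    by_cases hy : p y = true
    · simp only [List.dropWhile_cons, hy, if_true] at h
      intro x hx
      rcases List.mem_cons.1 hx with rfl | hx'
      · exact hy
      · exact ih h x hx'
    · simp only [Bool.not_eq_true] at hy
      simp [List.dropWhile_cons, hy] at h

theorem pvGetLast?_eq {l : List Char} (d : Char) (h : l ≠ []) :
    l.getLast? = some (l.getLastD d) := by
  cases l with
  | nil => simp at h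
  | cons x xs => simp [List.getLastD_eq_getLast?, List.getLast?_cons]

-- ---- char-class facts ----
-- ---- char-class facts ----
theorem pvDigit_word : ∀ x : Char, PySem.Chars.isdigit x = true → pvWord x = true := by
  intro x hx
  simp [pvWord, PySem.Chars.isalnum, hx]

-- ---- pvSegs unfolding ----
theorem pvSegs_of_nodrop {cs : List Char}
    (h : cs.dropWhile (fun c => c ≠ '"') = []) :
    pvSegs cs = if (cs.takeWhile (fun c => c ≠ '"')).isEmpty then []
      else [(true, cs.takeWhile (fun c => c ≠ '"'))] := by
  rw [pvSegs]
  split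
  · rfl
  · rename_i q' tail' h'
    rw [h] at h'
    simp at h'

theorem pvSegs_of_drop {cs : List Char} {q : Char} {tail : List Char}
    (h : cs.dropWhile (fun c => c ≠ '"') = q :: tail) :
    pvSegs cs = (if (cs.takeWhile (fun c => c ≠ '"')).isEmpty then []
        else [(true, cs.takeWhile (fun c => c ≠ '"'))]) ++
      (false, '"' :: (pvTakeString tail).1) :: pvSegs (pvTakeString tail).2 := by
  rw [pvSegs]
  split
  · simp_all
  · rename_i q' tail' h'
    rw [h] at h'
    cases h'
    rfl

-- ---- pvReplaceInCode facts ----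
theorem pvRC_nil (fpr cnt : Int) : pvReplaceInCode fpr cnt [] = [] := by
  rw [pvReplaceInCode]

theorem pvRC_nonword (fpr cnt : Int) {c : Char} (l : List Char) (hc : pvWord c = false) :
    pvReplaceInCode fpr cnt (c :: l) = c :: pvReplaceInCode fpr cnt l := by
  rw [pvReplaceInCode]
  simp [hc]

theorem pvRC_run (fpr cnt : Int) (w t : List Char) (hw : w ≠ [])
    (hall : ∀ x ∈ w, pvWord x = true) (ht : ∀ d, t.head? = some d → pvWord d = false) :
    pvReplaceInCode fpr cnt (w ++ t) = pvMapToken fpr cnt w ++ pvReplaceInCode fpr cnt t := by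
  cases w with
  | nil => simp at hw
  | cons a w' =>
    rw [List.cons_append, pvReplaceInCode]
    simp only [hall a (by simp), if_true]
    rw [← List.cons_append, pvTW_append (a :: w') t hall ht, pvDW_append (a :: w') t ht]
    have hdw : (a :: w').dropWhile pvWord = [] :=
      List.dropWhile_eq_nil_iff.mpr (fun x hx => hall x hx)
    rw [hdw, List.nil_append]

-- ---- pvJoinF facts ----
theorem pvJoinF_nil (fpr cnt : Int) : pvJoinF fpr cnt [] = [] := by
  unfold pvJoinF
  rw [pvSegs_of_nodrop (by rfl)]
  rfl

theorem pvJoinF_quote (fpr cnt : Int) (cs : List Char) :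
    pvJoinF fpr cnt ('"' :: cs) = '"' :: (pvTakeString cs).1 ++ pvJoinF fpr cnt (pvTakeString cs).2 := by
  unfold pvJoinF
  rw [pvSegs_of_drop (q := '"') (tail := cs) (by simp [List.dropWhile_cons, List.takeWhile_cons])]
  simp [List.takeWhile_cons]

theorem pvJoinF_nonword (fpr cnt : Int) {c : Char} (cs : List Char)
    (hq : c ≠ '"') (hw : pvWord c = false) :
    pvJoinF fpr cnt (c :: cs) = c :: pvJoinF fpr cnt cs := by
  have htw : (c :: cs).takeWhile (fun c => c ≠ '"') = c :: cs.takeWhile (fun c => c ≠ '"') := by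
    simp [List.takeWhile_cons, hq]
  have hdw : (c :: cs).dropWhile (fun c => c ≠ '"') = cs.dropWhile (fun c => c ≠ '"') := by
    simp [List.dropWhile_cons, hq]
  have hrc : ∀ l, pvReplaceInCode fpr cnt (c :: l) = c :: pvReplaceInCode fpr cnt l :=
    fun l => pvRC_nonword fpr cnt l hw
  unfold pvJoinF
  cases h : cs.dropWhile (fun c => c ≠ '"') with
  | nil =>
    rw [pvSegs_of_nodrop (hdw.trans h), pvSegs_of_nodrop h, htw]
    by_cases he : cs.takeWhile (fun c => c ≠ '"') = [] <;>
      simp only [ne_eq, decide_not] at he ⊢ <;>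
      simp [he, hrc, pvRC_nil, List.isEmpty_iff]
  | cons q tail =>
    rw [pvSegs_of_drop (hdw.trans h), pvSegs_of_drop h, htw]
    by_cases he : cs.takeWhile (fun c => c ≠ '"') = [] <;>
      simp only [ne_eq, decide_not] at he ⊢ <;>
      simp [he, hrc, pvRC_nil, List.isEmpty_iff]

theorem pvJoinF_run (fpr cnt : Int) {c : Char} (cs : List Char) (hw : pvWord c = true) :
    pvJoinF fpr cnt (c :: cs) =
      pvMapToken fpr cnt ((c :: cs).takeWhile pvWord) ++
        pvJoinF fpr cnt ((c :: cs).dropWhile pvWord) := by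
  have himp : ∀ x : Char, pvWord x = true → (fun c : Char => decide (c ≠ '"')) x = true := by
    intro x hx
    by_contra hcon
    simp at hcon
    subst hcon
    exact absurd hx (by decide)
  have hsplit : (c :: cs).takeWhile (fun c => c ≠ '"') =
      (c :: cs).takeWhile pvWord ++ ((c :: cs).dropWhile pvWord).takeWhile (fun c => c ≠ '"') :=
    pvTW_split himp (c :: cs)
  have hd : (c :: cs).dropWhile (fun c => c ≠ '"') =
      ((c :: cs).dropWhile pvWord).dropWhile (fun c => c ≠ '"') :=
    pvDW_sub himp (c :: cs)
  have hwne : (c :: cs).takeWhile pvWord = c :: cs.takeWhile pvWord := by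
    simp [List.takeWhile_cons, hw]
  have hallw : ∀ x ∈ (c :: cs).takeWhile pvWord, pvWord x = true :=
    fun x hx => List.mem_takeWhile_imp hx
  have hheadr : ∀ d, (((c :: cs).dropWhile pvWord).takeWhile (fun c => c ≠ '"')).head? = some d →
      pvWord d = false :=
    fun d hdd => pvHead_dropWhile (pvHead_takeWhile hdd)
  have hrc : pvReplaceInCode fpr cnt
        ((c :: cs).takeWhile pvWord ++ ((c :: cs).dropWhile pvWord).takeWhile (fun c => c ≠ '"')) =
      pvMapToken fpr cnt ((c :: cs).takeWhile pvWord) ++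
        pvReplaceInCode fpr cnt (((c :: cs).dropWhile pvWord).takeWhile (fun c => c ≠ '"')) :=
    pvRC_run fpr cnt _ _ (by simp [hwne]) hallw hheadr
  unfold pvJoinF
  cases h : ((c :: cs).dropWhile pvWord).dropWhile (fun c => c ≠ '"') with
  | nil =>
    have htwr : ((c :: cs).dropWhile pvWord).takeWhile (fun c => c ≠ '"') =
        (c :: cs).dropWhile pvWord := by
      have := List.takeWhile_append_dropWhile (p := fun c => decide (c ≠ '"'))
        (l := (c :: cs).dropWhile pvWord)
      rw [h, List.append_nil] at this
      exact this
    rw [pvSegs_of_nodrop (hd.trans h), pvSegs_of_nodrop h, hsplit]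
    by_cases he : (c :: cs).dropWhile pvWord = []
    · simp only [htwr, he, List.takeWhile_nil, List.append_nil, pvRC_nil] at hrc ⊢
      rw [hwne] at hrc
      simp [hwne, hrc]
    · simp only [htwr] at hrc ⊢
      rw [hwne] at hrc
      simp only [List.cons_append] at hrc
      simp [hwne, hrc, he, List.isEmpty_iff]
  | cons q tail =>
    rw [pvSegs_of_drop (hd.trans h), pvSegs_of_drop h, hsplit]
    by_cases he : ((c :: cs).dropWhile pvWord).takeWhile (fun c => c ≠ '"') = []
    · simp only [he, List.append_nil, pvRC_nil] at hrc ⊢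
      rw [hwne] at hrc
      simp [hwne, hrc]
    · rw [hwne] at hrc
      simp only [List.cons_append] at hrc
      have hne1 : ¬((((c :: cs).takeWhile pvWord ++
          ((c :: cs).dropWhile pvWord).takeWhile (fun c => c ≠ '"')).isEmpty) = true) := by
        simp [hwne]
      have hne2 : ¬((((c :: cs).dropWhile pvWord).takeWhile (fun c => c ≠ '"')).isEmpty = true) := by
        simpa [List.isEmpty_iff] using he
      rw [if_neg hne1, if_neg hne2]
      simp only [ne_eq, decide_not] at hrc
      simp [hwne, hrc]

theorem pvALoop_nil (fpr cnt : Int) (b : Bool) (prev : Option Char) :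
    pvALoop fpr cnt [] b prev = [] := by
  rw [pvALoop.eq_def]

theorem pvGetLastD_cons (a b : Char) (l : List Char) :
    ((a :: l).getLast?.getD b) = l.getLast?.getD a := by
  rw [← List.getLastD_eq_getLast?, ← List.getLastD_eq_getLast?, List.getLastD_cons]

-- ---- pvMapToken reduction helpers ----
theorem pvMT_nonv (fpr cnt : Int) {c : Char} (ds : List Char) (hc : c ≠ 'v') :
    pvMapToken fpr cnt (c :: ds) = c :: ds := by
  unfold pvMapToken
  split
  · rename_i heq
    injection heq with h1 h2
    exact absurd h1 hc
  · rfl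

theorem pvMT_v (fpr cnt : Int) (ds : List Char) :
    pvMapToken fpr cnt ('v' :: ds) =
      if ds ≠ [] ∧ ds.all PySem.Chars.isdigit then
        if fpr ≤ pvDigitsVal ds ∧ pvDigitsVal ds < fpr + cnt then
          'p' :: PySem.Int.toChars (pvDigitsVal ds - fpr)
        else 'v' :: ds
      else 'v' :: ds := by
  rfl

-- ---- A-side loop lemmas ----
theorem pvString_mode (fpr cnt : Int) (cs : List Char) : ∀ prev : Option Char,
    pvALoop fpr cnt cs true prev =
      (pvTakeString cs).1 ++ pvALoop fpr cnt (pvTakeString cs).2 false (some '"') := by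
  induction cs using pvTakeString.induct with
  | case1 =>
    intro prev
    rw [pvALoop.eq_def]
    simp [pvTakeString, pvALoop_nil]
  | case2 c2 rest ih =>
    intro prev
    rw [pvALoop.eq_def]
    simp only [pvTakeString]
    simp [ih]
  | case3 rest =>
    intro prev
    rw [pvALoop.eq_def]
    simp [pvTakeString]
  | case4 c rest h1 h2 ih =>
    intro prev
    by_cases hb : c = '\\'
    · subst hb
      have hrest : rest = [] := by
        cases rest with
        | nil => rfl
        | cons a b => exact ((h1 a b rfl rfl).elim)
      subst hrest
      rw [pvALoop.eq_def]
      simp [pvTakeString, pvALoop]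
    · rw [pvALoop.eq_def]
      simp only [pvTakeString]
      simp [hb, show ¬ c = '"' from h2, ih]

theorem pvCopyRun (fpr cnt : Int) (u : List Char) : ∀ (t : List Char) (p : Char),
    (∀ x ∈ u, pvWord x = true) → pvWord p = true →
    pvALoop fpr cnt (u ++ t) false (some p) =
      u ++ pvALoop fpr cnt t false (some (u.getLastD p)) := by
  induction u with
  | nil => intro t p _ _; simp [List.getLastD]
  | cons x u' ih =>
    intro t p hu hp
    have hx : pvWord x = true := hu x (by simp)
    have hxq : ¬ x = '"' := by rintro rfl; exact absurd hx (by decide)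
    have hpb : pvPrevBlk (some p) = true := hp
    rw [List.cons_append, pvALoop.eq_def]
    simp only [hxq, if_false, beq_iff_eq, reduceIte]
    by_cases hv : x = 'v'
    · subst hv
      simp only [if_pos rfl]
      by_cases hds : 0 < ((u' ++ t).takeWhile PySem.Chars.isdigit).length
      · simp only [if_pos hds, hpb]
        simp only [show (true == false) = false from rfl, Bool.false_and, Bool.false_eq_true,
          if_false]
        rw [ih t 'v' (fun y hy => hu y (by simp [hy])) (by decide)]
        simp [pvGetLastD_cons]
      · simp only [if_neg hds]
        rw [ih t 'v' (fun y hy => hu y (by simp [hy])) (by decide)]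
        simp [pvGetLastD_cons]
    · simp only [if_neg hv]
      rw [ih t x (fun y hy => hu y (by simp [hy])) hx]
      simp [pvGetLastD_cons]

theorem pvRun (fpr cnt : Int) (c : Char) (rest : List Char) (prev : Option Char)
    (hc : pvWord c = true) (hprev : pvPrevBlk prev = false) :
    pvALoop fpr cnt (c :: rest) false prev =
      pvMapToken fpr cnt ((c :: rest).takeWhile pvWord) ++
        pvALoop fpr cnt ((c :: rest).dropWhile pvWord) false
          (some (((c :: rest).takeWhile pvWord).getLastD c)) := by
  have hcq : ¬ c = '"' := by rintro rfl; exact absurd hc (by decide)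
  have htw : (c :: rest).takeWhile pvWord = c :: rest.takeWhile pvWord := by
    simp [List.takeWhile_cons, hc]
  have hdwr : (c :: rest).dropWhile pvWord = rest.dropWhile pvWord := by
    simp [List.dropWhile_cons, hc]
  have hallw : ∀ x ∈ rest.takeWhile pvWord, pvWord x = true :=
    fun x hx => List.mem_takeWhile_imp hx
  have hheadr : ∀ d, (rest.dropWhile pvWord).head? = some d → pvWord d = false :=
    fun d hd => pvHead_dropWhile hd
  have hsplit : rest.takeWhile pvWord ++ rest.dropWhile pvWord = rest :=
    List.takeWhile_append_dropWhile
  rw [htw, hdwr, List.getLastD_cons]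
  by_cases hv : c = 'v'
  case neg =>
    rw [pvALoop.eq_def]
    simp only [beq_iff_eq, if_neg hcq, if_neg hv]
    rw [pvMT_nonv fpr cnt _ hv]
    conv_lhs => rw [← hsplit]
    rw [pvCopyRun fpr cnt _ _ c hallw hc]
    simp [List.getLastD_eq_getLast?]
  case pos =>
    subst hv
    have hds_eq : rest.takeWhile PySem.Chars.isdigit =
        (rest.takeWhile pvWord).takeWhile PySem.Chars.isdigit :=
      pvTW_sub pvDigit_word rest
    have hrdnd : ∀ d, (rest.dropWhile pvWord).head? = some d →
        PySem.Chars.isdigit d = false := by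
      intro d hd
      cases hdig : PySem.Chars.isdigit d
      · rfl
      · exact absurd (hheadr d hd) (by simp [pvDigit_word d hdig])
    have hdw_digit : rest.dropWhile PySem.Chars.isdigit =
        (rest.takeWhile pvWord).dropWhile PySem.Chars.isdigit ++ rest.dropWhile pvWord := by
      conv_lhs => rw [← hsplit]
      exact pvDW_append _ _ hrdnd
    by_cases h1 : (rest.takeWhile pvWord).takeWhile PySem.Chars.isdigit = []
    · -- no digit run follows the 'v': plain copy
      have hds0 : rest.takeWhile PySem.Chars.isdigit = [] := hds_eq.trans h1
      have hnotall : ¬(rest.takeWhile pvWord ≠ [] ∧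
          (rest.takeWhile pvWord).all PySem.Chars.isdigit) := by
        rintro ⟨hne, hall⟩
        cases hw : rest.takeWhile pvWord with
        | nil => exact hne hw
        | cons d tl =>
          rw [hw] at hall
          simp only [List.all_cons, Bool.and_eq_true] at hall
          rw [hw, List.takeWhile_cons, if_pos hall.1] at h1
          simp at h1
      rw [pvALoop.eq_def]
      simp only [beq_iff_eq, if_neg hcq, if_pos rfl, hds0, List.length_nil,
        lt_irrefl, if_false]
      rw [pvMT_v, if_neg hnotall]
      conv_lhs => rw [← hsplit]
      rw [pvCopyRun fpr cnt _ _ 'v' hallw (by decide)]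
      simp [List.getLastD_eq_getLast?]
    · have hlen : 0 < (rest.takeWhile PySem.Chars.isdigit).length := by
        rw [hds_eq]
        exact List.length_pos_of_ne_nil h1
      by_cases h2 : (rest.takeWhile pvWord).dropWhile PySem.Chars.isdigit = []
      · -- the whole word run is v + digits
        have hw'ds : rest.takeWhile pvWord =
            (rest.takeWhile pvWord).takeWhile PySem.Chars.isdigit := by
          conv_lhs => rw [← List.takeWhile_append_dropWhile (p := PySem.Chars.isdigit)
            (l := rest.takeWhile pvWord)]
          rw [h2, List.append_nil]
        have hne : rest.takeWhile pvWord ≠ [] := by rw [hw'ds]; exact h1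
        have hds_w : rest.takeWhile PySem.Chars.isdigit = rest.takeWhile pvWord := by
          rw [hds_eq, ← hw'ds]
        have hrest' : rest.dropWhile PySem.Chars.isdigit = rest.dropWhile pvWord := by
          rw [hdw_digit, h2, List.nil_append]
        have hnb : pvNextBlk (rest.dropWhile pvWord) = false := by
          cases hr : rest.dropWhile pvWord with
          | nil => rfl
          | cons d tl => simpa [pvNextBlk] using hheadr d (by rw [hr]; rfl)
        have hall : (rest.takeWhile pvWord).all PySem.Chars.isdigit := by
          simp only [List.all_eq_true]
          exact fun x hx => pvDropWhile_nil_all h2 x hx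
        rw [pvALoop.eq_def]
        simp only [beq_iff_eq, if_neg hcq, if_pos rfl, if_pos hlen, hrest', hprev, hnb]
        simp only [show ((false == false) && (false == false)) = true from rfl, if_true]
        rw [hds_w]
        conv_rhs => rw [pvMT_v, if_pos (And.intro hne hall)]
        by_cases h3 : fpr ≤ pvDigitsVal (rest.takeWhile pvWord) ∧
            pvDigitsVal (rest.takeWhile pvWord) < fpr + cnt
        · rw [if_pos h3]
          conv_rhs => rw [if_pos h3]
          rw [pvGetLast?_eq 'v' hne]
          try simp [List.getLastD_eq_getLast?]
        · rw [if_neg h3]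
          conv_rhs => rw [if_neg h3]
          conv_lhs => rw [← hsplit]
          rw [pvCopyRun fpr cnt _ _ 'v' hallw (by decide)]
          simp [List.getLastD_eq_getLast?]
      · -- a non-digit word char follows the digits: next_char blocks
        have hdmem : ∀ d tl, (rest.takeWhile pvWord).dropWhile PySem.Chars.isdigit = d :: tl →
            d ∈ rest.takeWhile pvWord := by
          intro d tl hmid
          exact (List.dropWhile_sublist _).subset (by rw [hmid]; simp)
        have hnb : pvNextBlk (rest.dropWhile PySem.Chars.isdigit) = true := by
          cases hmid : (rest.takeWhile pvWord).dropWhile PySem.Chars.isdigit with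
          | nil => exact absurd hmid h2
          | cons d tl =>
            rw [hdw_digit, hmid]
            simpa [pvNextBlk] using hallw d (hdmem d tl hmid)
        have hnotall : ¬(rest.takeWhile pvWord ≠ [] ∧
            (rest.takeWhile pvWord).all PySem.Chars.isdigit) := by
          rintro ⟨-, hall⟩
          cases hmid : (rest.takeWhile pvWord).dropWhile PySem.Chars.isdigit with
          | nil => exact absurd hmid h2
          | cons d tl =>
            have hdig : PySem.Chars.isdigit d = true := by
              simp only [List.all_eq_true] at hall
              exact hall d (hdmem d tl hmid)
            have hnd : PySem.Chars.isdigit d = false :=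
              pvHead_dropWhile (l := rest.takeWhile pvWord) (by rw [hmid]; rfl)
            rw [hdig] at hnd
            cases hnd
        rw [pvALoop.eq_def]
        simp only [beq_iff_eq, if_neg hcq, if_pos rfl, if_pos hlen, hprev, hnb]
        simp only [show ((false == false) && (true == false)) = false from rfl,
          Bool.false_eq_true, if_false]
        rw [pvMT_v, if_neg hnotall]
        conv_lhs => rw [← hsplit]
        rw [pvCopyRun fpr cnt _ _ 'v' hallw (by decide)]
        simp [List.getLastD_eq_getLast?]

theorem pvMainAux (fpr cnt : Int) : ∀ (n : Nat) (cs : List Char) (prev : Option Char),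
    cs.length ≤ n →
    (∀ p, prev = some p → pvWord p = true → ∀ c, cs.head? = some c → pvWord c = false) →
    pvALoop fpr cnt cs false prev = pvJoinF fpr cnt cs := by
  intro n
  induction n with
  | zero =>
    intro cs prev hlen _
    have hnil : cs = [] := List.eq_nil_of_length_eq_zero (Nat.le_zero.mp hlen)
    subst hnil
    rw [pvALoop_nil, pvJoinF_nil]
  | succ n ih =>
    intro cs prev hlen hok
    cases cs with
    | nil => rw [pvALoop_nil, pvJoinF_nil]
    | cons c rest =>
      have hrest_le : rest.length ≤ n := by
        simp only [List.length_cons] at hlen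
        omega
      by_cases hq : c = '"'
      · subst hq
        rw [pvALoop.eq_def]
        simp only [beq_iff_eq, if_pos rfl]
        rw [pvString_mode fpr cnt rest (some '"'), pvJoinF_quote]
        have hlen2 : (pvTakeString rest).2.length ≤ n :=
          le_trans (pvTakeString_snd_le rest) hrest_le
        rw [ih (pvTakeString rest).2 (some '"') hlen2 ?hok2]
        case hok2 =>
          intro p hp hwp d hd
          cases hp
          exact absurd hwp (by decide)
        simp
      · by_cases hw : pvWord c = true
        · have hprev : pvPrevBlk prev = false := by
            cases prev with
            | none => rfl
            | some p =>
              by_cases hwp : pvWord p = true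
              · exact absurd (hok p rfl hwp c rfl) (by simp [hw])
              · simpa [pvPrevBlk] using hwp
          rw [pvRun fpr cnt c rest prev hw hprev, pvJoinF_run fpr cnt rest hw]
          congr 1
          apply ih
          · have hd : (c :: rest).dropWhile pvWord = rest.dropWhile pvWord := by
              simp [List.dropWhile_cons, hw]
            rw [hd]
            exact le_trans (List.length_dropWhile_le _ _) hrest_le
          · intro p hp hwp d hd
            exact pvHead_dropWhile hd
        · have hv : c ≠ 'v' := by
            rintro rfl
            exact absurd (by decide : pvWord 'v' = true) hw
          rw [pvALoop.eq_def]
          simp only [beq_iff_eq, if_neg hq, if_neg hv]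
          rw [ih rest (some c) hrest_le ?hok3]
          case hok3 =>
            intro p hp hwp d hd
            cases hp
            exact absurd hwp hw
          rw [pvJoinF_nonword fpr cnt rest hq (by simpa using hw)]

theorem pvMain (fpr cnt : Int) (cs : List Char) (prev : Option Char)
    (hok : ∀ p, prev = some p → pvWord p = true → ∀ c, cs.head? = some c → pvWord c = false) :
    pvALoop fpr cnt cs false prev = pvJoinF fpr cnt cs :=
  pvMainAux fpr cnt cs.length cs prev le_rfl hok

theorem replace_param_v_registers_with_p_aliases_spec : Claim_equal_replace_param_v_registers_with_p_aliases := by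
  intro line fpr cnt _
  unfold Spec_replace_param_v_registers_with_p_aliases
  unfold replace_param_v_registers_with_p_aliases replace_param_v_registers_with_p_aliases_alt
  by_cases h : cnt ≤ 0
  · simp [h]
  · simp only [h, if_false]
    rw [pvMain fpr cnt line.toList none (by intro p hp; simp at hp)]
    rfl
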